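-- pv_equiv track=rewrite | github.com/PossiblyAxolotl/CS20-pig-latin | pig-latin-streamlit.py | pop_prefix
-- ===== SOURCE A (Python) =====
-- def pop_prefix(text):
--     '''Separate the prefix from the text and return both the prefix and remaining text'''
--
--     vowels = "aeiouy"
--
--     lower_text = text.lower()
--
--     # loop through vowels to find the first instance of one
--     first_vowel = len(text)
--     for vowel in vowels:
--         vowel_location = lower_text.find(vowel)
--
--         if vowel_location < first_vowel and vowel_location != -1:
--             first_vowel = vowel_location
--
--     # separate prefix from the reset of the word
--     prefix = text[:first_vowel]
--     remainder = text[first_vowel:]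
--
--     return prefix, remainder
-- ===== SOURCE B (Python) =====
-- def pop_prefix(text):
--     '''Separate the prefix from the text and return both the prefix and remaining text'''
--     idx = len(text)
--     for i, ch in enumerate(text):
--         if ch.lower() in "aeiouy":
--             idx = i
--             break
--     return text[:idx], text[idx:]
-- ===== Notes on version B (the rewrite author's own statement) =====
-- stated objective: simpler
-- what changed: Replaces six per-vowel .find() scans with min-tracking by a single left-to-right pass over the characters that stops at the first character whose lowercase form is a vowel.
import Mathlib
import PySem

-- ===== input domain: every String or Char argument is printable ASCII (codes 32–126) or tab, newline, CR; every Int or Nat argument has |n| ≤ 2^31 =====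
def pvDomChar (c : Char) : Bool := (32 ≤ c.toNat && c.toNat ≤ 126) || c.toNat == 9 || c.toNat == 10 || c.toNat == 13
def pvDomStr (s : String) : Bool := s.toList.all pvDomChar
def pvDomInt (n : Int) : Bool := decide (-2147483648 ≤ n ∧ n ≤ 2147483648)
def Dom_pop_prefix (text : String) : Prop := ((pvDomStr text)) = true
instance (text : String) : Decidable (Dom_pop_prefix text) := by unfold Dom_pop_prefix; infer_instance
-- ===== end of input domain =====

-- B replaces A's six per-vowel .find() scans with one left-to-right pass stopping at the
-- first character whose lowercase form is a vowel (objective: simpler).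

-- ===== PORT A =====
def pop_prefix (text : String) : String × String :=
  let vowels : String := "aeiouy"
  let lower_text : String := PySem.Str.lower text
  let first_vowel : Int :=
    vowels.toList.foldl (fun first_vowel vowel =>
      let vowel_location := PySem.Str.find lower_text (String.ofList [vowel])
      if vowel_location < first_vowel ∧ vowel_location ≠ -1 then vowel_location
      else first_vowel) (PySem.Str.len text)
  let prefix_ := PySem.Str.slice text none (some first_vowel)  -- 'prefix' is a Lean keyword
  let remainder := PySem.Str.slice text (some first_vowel) none
  (prefix_, remainder)

-- ===== PORT B =====
-- B's early-breaking `for i, ch in enumerate(text)` loop with default len(text) is exactly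
-- List.findIdx (first index satisfying the predicate, length if none).
def pop_prefix_alt (text : String) : String × String :=
  let cs := text.toList
  let idx := cs.findIdx (fun ch => decide (PySem.Chars.lowerChar ch ∈ "aeiouy".toList))
  (String.ofList (cs.take idx), String.ofList (cs.drop idx))

-- ===== PRECONDITION & SPEC =====
def Spec_pop_prefix (text : String) (out : String × String) : Prop := out = pop_prefix_alt text
instance (text : String) (out : String × String) : Decidable (Spec_pop_prefix text out) := by unfold Spec_pop_prefix; infer_instance

-- ===== CLAIM (what is proved, stated in full; the proofs are below) =====
def Claim_equal_pop_prefix : Prop := ∀ (text : String), Dom_pop_prefix text → Spec_pop_prefix text (pop_prefix text)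

-- ===== LEMMAS AND PROOFS =====

-- A's min-tracking loop over the vowel string, abstracted over the per-vowel location function.
def pvFold (loc : Char → Int) (a : Int) (vs : List Char) : Int :=
  vs.foldl (fun fv v => if loc v < fv ∧ loc v ≠ -1 then loc v else fv) a

theorem pvFold_le_init (loc : Char → Int) (a : Int) (vs : List Char) :
    pvFold loc a vs ≤ a := by
  induction vs generalizing a with
  | nil => simp [pvFold]
  | cons v t ih =>
    have h1 : pvFold loc ((if loc v < a ∧ loc v ≠ -1 then loc v else a)) t ≤
        (if loc v < a ∧ loc v ≠ -1 then loc v else a) := ih _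
    have h2 : (if loc v < a ∧ loc v ≠ -1 then loc v else a) ≤ a := by split_ifs with h <;> omega
    calc pvFold loc a (v :: t) = pvFold loc _ t := rfl
    _ ≤ _ := h1
    _ ≤ a := h2

theorem pvFold_le (loc : Char → Int) (a : Int) {vs : List Char} {v : Char}
    (hv : v ∈ vs) (hne : loc v ≠ -1) : pvFold loc a vs ≤ loc v := by
  induction vs generalizing a with
  | nil => cases hv
  | cons w t ih =>
    rcases List.mem_cons.1 hv with rfl | hv'
    · have h1 : pvFold loc (if loc v < a ∧ loc v ≠ -1 then loc v else a) t ≤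
          (if loc v < a ∧ loc v ≠ -1 then loc v else a) := pvFold_le_init _ _ _
      have h2 : (if loc v < a ∧ loc v ≠ -1 then loc v else a) ≤ loc v := by
        split_ifs with h
        · exact le_refl _
        · push_neg at h
          rcases lt_or_ge (loc v) a with hlt | hge
          · exact absurd (h hlt) hne
          · exact hge
      calc pvFold loc a (v :: t)
          = pvFold loc (if loc v < a ∧ loc v ≠ -1 then loc v else a) t := rfl
        _ ≤ (if loc v < a ∧ loc v ≠ -1 then loc v else a) := h1
        _ ≤ loc v := h2
    · exact ih _ hv'

theorem pvFold_lb (loc : Char → Int) {i : Int} {vs : List Char} {a : Int}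
    (ha : i ≤ a) (h : ∀ v ∈ vs, loc v ≠ -1 → i ≤ loc v) : i ≤ pvFold loc a vs := by
  induction vs generalizing a with
  | nil => simpa [pvFold] using ha
  | cons v t ih =>
    have hstep : i ≤ (if loc v < a ∧ loc v ≠ -1 then loc v else a) := by
      split_ifs with hc
      · exact h v (List.mem_cons_self ..) hc.2
      · exact ha
    exact ih hstep (fun w hw => h w (List.mem_cons_of_mem _ hw))

theorem pvFold_all_neg (loc : Char → Int) {vs : List Char} (a : Int)
    (h : ∀ v ∈ vs, loc v = -1) : pvFold loc a vs = a := by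
  induction vs generalizing a with
  | nil => rfl
  | cons v t ih =>
    have hv := h v (List.mem_cons_self ..)
    have : (if loc v < a ∧ loc v ≠ -1 then loc v else a) = a := by
      rw [if_neg]; simp [hv]
    have hstep : pvFold loc a (v :: t)
        = pvFold loc (if loc v < a ∧ loc v ≠ -1 then loc v else a) t := rfl
    rw [hstep, this]
    exact ih _ (fun w hw => h w (List.mem_cons_of_mem _ hw))

theorem pv_singleton_prefix_drop (v : Char) (ls : List Char) (k : Nat) :
    [v] <+: ls.drop k ↔ ls[k]? = some v := by
  rw [List.cons_prefix_iff, ← List.head?_drop]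
  constructor
  · rintro ⟨l', hl, -⟩; rw [hl]; rfl
  · intro h
    rcases hd : ls.drop k with _ | ⟨c, t⟩
    · rw [hd] at h; cases h
    · rw [hd] at h
      simp at h
      exact ⟨t, by simp [h], List.nil_prefix⟩

theorem pv_findIdx_le {α : Type} (p : α → Bool) (ls : List α) (k : Nat) (hk : k < ls.length)
    (hp : p (ls[k]'hk) = true) : ls.findIdx p ≤ k := by
  by_contra hh
  push_neg at hh
  have h2 := List.not_of_lt_findIdx hh
  exact absurd (hp.symm.trans h2) (by decide)

-- the heart: A's fold over the vowels computes B's first-vowel index on the lowered list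
theorem pv_fold_eq_findIdx (ls : List Char) (V : List Char) :
    pvFold (fun v => PySem.Chars.find ls [v]) (ls.length : Int) V =
      (ls.findIdx (fun c => decide (c ∈ V)) : Int) := by
  set p : Char → Bool := fun c => decide (c ∈ V) with hp
  by_cases hidx : ls.findIdx p < ls.length
  · set i := ls.findIdx p with hi
    have hpi : p ls[i] = true := List.findIdx_getElem (w := hidx)
    set v0 := ls[i] with hv0
    have hv0V : v0 ∈ V := by simpa [hp] using hpi
    have hv0mem : v0 ∈ ls := List.getElem_mem hidx
    have hinf : [v0] <:+: ls := by
      obtain ⟨s, t, hst⟩ := List.mem_iff_append.1 hv0mem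
      exact ⟨s, t, by simpa using hst.symm⟩
    have hne : PySem.Chars.find ls [v0] ≠ -1 := (PySem.Chars.find_ne_neg_one_iff _ _).2 hinf
    have h0 : 0 ≤ PySem.Chars.find ls [v0] := by
      have := PySem.Chars.neg_one_le_find ls [v0]; omega
    obtain ⟨hpre, hmin⟩ := PySem.Chars.find_spec h0
    have hle : (PySem.Chars.find ls [v0]).toNat ≤ i := by
      by_contra hcon
      push_neg at hcon
      exact hmin i hcon ((pv_singleton_prefix_drop v0 ls i).2 (by simp [hv0, List.getElem?_eq_getElem hidx]))
    have hlb : ∀ v ∈ V, PySem.Chars.find ls [v] ≠ -1 → (i : Int) ≤ PySem.Chars.find ls [v] := by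
      intro v hvV hne'
      have h0' : 0 ≤ PySem.Chars.find ls [v] := by
        have := PySem.Chars.neg_one_le_find ls [v]; omega
      obtain ⟨hpre', -⟩ := PySem.Chars.find_spec h0'
      have hk : ls[(PySem.Chars.find ls [v]).toNat]? = some v :=
        (pv_singleton_prefix_drop v ls _).1 hpre'
      have hklt : (PySem.Chars.find ls [v]).toNat < ls.length := by
        by_contra hh; push_neg at hh
        rw [List.getElem?_eq_none hh] at hk; cases hk
      have hpk : p (ls[(PySem.Chars.find ls [v]).toNat]'hklt) = true := by
        have : ls[(PySem.Chars.find ls [v]).toNat]'hklt = v := by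
          have hg := List.getElem?_eq_getElem hklt
          rw [hg] at hk; exact Option.some.inj hk
        simp [hp, this, hvV]
      have : i ≤ (PySem.Chars.find ls [v]).toNat := by
        have := pv_findIdx_le p ls _ hklt hpk
        omega
      omega
    have h1 : pvFold (fun v => PySem.Chars.find ls [v]) (ls.length : Int) V ≤
        PySem.Chars.find ls [v0] := pvFold_le _ _ hv0V hne
    have h2 : (i : Int) ≤ pvFold (fun v => PySem.Chars.find ls [v]) (ls.length : Int) V :=
      pvFold_lb _ (by exact_mod_cast Nat.le_of_lt hidx) hlb
    have h3 := hlb v0 hv0V hne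
    omega
  · have heq : ls.findIdx p = ls.length :=
      le_antisymm List.findIdx_le_length (le_of_not_gt hidx)
    have hnone : ∀ c ∈ ls, p c = false := by
      rw [← List.findIdx_eq_length]; exact heq
    have hall : ∀ v ∈ V, PySem.Chars.find ls [v] = -1 := by
      intro v hvV
      by_contra hne
      have hinf : [v] <:+: ls := (PySem.Chars.find_ne_neg_one_iff _ _).1 hne
      have hmem : v ∈ ls := hinf.subset (List.mem_singleton_self v)
      have := hnone v hmem
      simp [hp, hvV] at this
    rw [pvFold_all_neg _ _ hall, heq]

-- ===== VERDICT (by name: the statement is the Claim_ definition above) =====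
theorem pop_prefix_spec : Claim_equal_pop_prefix := by
  intro text _
  unfold Spec_pop_prefix pop_prefix pop_prefix_alt
  dsimp only
  set cs := text.toList with hcs
  set V : List Char := "aeiouy".toList with hV
  have hlower : (PySem.Str.lower text).toList = PySem.Chars.lower cs := PySem.Str.toList_lower text
  have hfold :
      V.foldl (fun first_vowel vowel =>
        if PySem.Str.find (PySem.Str.lower text) (String.ofList [vowel]) < first_vowel ∧
            PySem.Str.find (PySem.Str.lower text) (String.ofList [vowel]) ≠ -1 then
          PySem.Str.find (PySem.Str.lower text) (String.ofList [vowel])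
        else first_vowel) (PySem.Str.len text)
      = pvFold (fun v => PySem.Chars.find (PySem.Chars.lower cs) [v])
          (((PySem.Chars.lower cs).length : Nat) : Int) V := by
    have hlen2 : ((text.length : Nat) : Int) = ((cs.length : Nat) : Int) := by simp [hcs]
    simp [pvFold, PySem.Str.find, PySem.Str.len, hlower, PySem.Chars.lower, hlen2]
  rw [hfold, pv_fold_eq_findIdx]
  set j := (PySem.Chars.lower cs).findIdx (fun c => decide (c ∈ V)) with hj
  have hjB : cs.findIdx (fun ch => decide (PySem.Chars.lowerChar ch ∈ V)) = j := by
    rw [hj, PySem.Chars.lower, List.findIdx_map]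
    rfl
  have h0 : (0 : Int) ≤ (j : Int) := Int.natCast_nonneg j
  have hA1 : PySem.Str.slice text none (some (j : Int)) = String.ofList (cs.take j) := by
    simp [PySem.Str.slice, PySem.Chars.slice, PySem.List.slice_to _ h0, hcs]
  have hA2 : PySem.Str.slice text (some (j : Int)) none = String.ofList (cs.drop j) := by
    simp [PySem.Str.slice, PySem.Chars.slice, PySem.List.slice_from _ h0, hcs]
  rw [hA1, hA2, hjB]
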